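-- pv_equiv track=rewrite | github.com/Aksh080808/Line_Simulation | app.py | determine_lockout_zones
-- ===== SOURCE A (Python) =====
-- def determine_lockout_zones(group_names):
--     """
--     Determine lockout zones based on the presence of 'STACKER' or 'WIP CART' in the group names.
--     Each zone includes groups up to and including the next stacker or WIP cart. Remaining groups
--     form the final zone. Returns a list of lists where each inner list contains group names
--     belonging to a lockout zone.
--     """
--     zones = []
--     current_zone = []
--     for g in group_names:
--         if not g:
--             continue
--         current_zone.append(g)
--         name_upper = g.upper()
--         # Identify boundaries based on keywords
--         if ("STACKER" in name_upper) or ("WIP CART" in name_upper) or ("WIPCART" in name_upper):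
--             zones.append(list(current_zone))
--             current_zone = []
--     if current_zone:
--         zones.append(list(current_zone))
--     return zones
-- ===== SOURCE B (Python) =====
-- def determine_lockout_zones(group_names):
--     """Build the zones back to front: scan the names in reverse; a boundary name
--     opens a new (nearest) zone, every other non-empty name joins the nearest zone
--     (or opens the trailing zone if none exists yet). Zones are collected in
--     reverse order with their members reversed, and straightened at the end."""
--     zones_rev = []
--     for g in reversed(group_names):
--         if not g:
--             continue
--         u = g.upper()
--         if ("STACKER" in u) or ("WIP CART" in u) or ("WIPCART" in u) or not zones_rev:
--             zones_rev.append([g])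
--         else:
--             zones_rev[-1].append(g)
--     return [z[::-1] for z in reversed(zones_rev)]
-- ===== Notes on version B (the rewrite author's own statement) =====
-- stated objective: alternative
-- what changed: B builds the zone list back-to-front in one reverse pass (a boundary opens the nearest zone, other names are prepended to it), replacing A's forward accumulate-and-flush loop with its current_zone buffer and trailing-flush step.
import Mathlib
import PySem

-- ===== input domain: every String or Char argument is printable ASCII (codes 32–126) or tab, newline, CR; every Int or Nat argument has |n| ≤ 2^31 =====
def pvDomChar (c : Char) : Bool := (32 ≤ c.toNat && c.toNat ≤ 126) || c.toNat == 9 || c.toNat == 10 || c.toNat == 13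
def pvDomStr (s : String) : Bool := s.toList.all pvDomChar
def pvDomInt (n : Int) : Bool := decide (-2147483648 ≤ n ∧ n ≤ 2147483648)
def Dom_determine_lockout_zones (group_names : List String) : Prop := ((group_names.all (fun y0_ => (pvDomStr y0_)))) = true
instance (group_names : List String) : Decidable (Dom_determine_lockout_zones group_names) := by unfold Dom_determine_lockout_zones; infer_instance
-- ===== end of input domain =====

-- B builds the zone list back-to-front in one reverse pass instead of A's forward
-- accumulate-and-flush loop; same cost, different decomposition (objective: alternative).

-- ===== PORT A =====
-- shared by both ports: the Python boundary test '"STACKER" in g.upper() or ...'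
def pvIsBoundary (g : String) : Bool :=
  let u := PySem.Str.upper g
  PySem.Str.isIn "STACKER" u || PySem.Str.isIn "WIP CART" u || PySem.Str.isIn "WIPCART" u

def determine_lockout_zones (group_names : List String) : List (List String) :=
  let st : List (List String) × List String :=
    group_names.foldl (fun s g =>
      if g = "" then s                       -- 'if not g: continue'
      else
        let cur := s.2 ++ [g]                -- current_zone.append(g)
        if pvIsBoundary g then (s.1 ++ [cur], []) else (s.1, cur))
      ([], [])
  if st.2 = [] then st.1 else st.1 ++ [st.2] -- 'if current_zone: zones.append(current_zone)'

-- ===== PORT B =====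
def determine_lockout_zones_alt (group_names : List String) : List (List String) :=
  let zr : List (List String) :=
    group_names.reverse.foldl (fun zr g =>   -- 'for g in reversed(group_names)'
      if g = "" then zr
      else if pvIsBoundary g || zr.isEmpty then zr ++ [[g]]       -- open the nearest zone
      else zr.dropLast ++ [zr.getLastD [] ++ [g]]) []             -- zones_rev[-1].append(g)
  zr.reverse.map List.reverse                -- '[z[::-1] for z in reversed(zones_rev)]'

-- ===== PRECONDITION & SPEC =====
def Spec_determine_lockout_zones (group_names : List String) (out : List (List String)) : Prop := out = determine_lockout_zones_alt group_names
instance (group_names : List String) (out : List (List String)) : Decidable (Spec_determine_lockout_zones group_names out) := by unfold Spec_determine_lockout_zones; infer_instance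

-- ===== CLAIM (what is proved, stated in full; the proofs are below) =====
def Claim_equal_determine_lockout_zones : Prop := ∀ (group_names : List String), Dom_determine_lockout_zones group_names → Spec_determine_lockout_zones group_names (determine_lockout_zones group_names)

-- ===== LEMMAS AND PROOFS =====

-- reference recursion: the zone list, defined structurally
def pvSpec : List String → List (List String)
  | [] => []
  | g :: t =>
      if g = "" then pvSpec t
      else if pvIsBoundary g then [g] :: pvSpec t
      else match pvSpec t with
        | [] => [[g]]
        | z :: zs => (g :: z) :: zs

-- prepend a pending buffer onto a zone list
def pvAttach (cur : List String) (s : List (List String)) : List (List String) :=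
  if cur = [] then s else match s with | [] => [cur] | z :: zs => (cur ++ z) :: zs

theorem pvA_inv (l : List String) : ∀ (zones : List (List String)) (cur : List String),
    (let st := l.foldl (fun (s : List (List String) × List String) g =>
        if g = "" then s
        else
          let c := s.2 ++ [g]
          if pvIsBoundary g then (s.1 ++ [c], []) else (s.1, c)) (zones, cur)
     if st.2 = [] then st.1 else st.1 ++ [st.2]) = zones ++ pvAttach cur (pvSpec l) := by
  induction l with
  | nil =>
      intro zones cur
      simp only [List.foldl_nil, pvSpec, pvAttach]
      by_cases h : cur = [] <;> simp [h]
  | cons g t ih =>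
      intro zones cur
      simp only [List.foldl_cons, pvSpec]
      by_cases hg : g = ""
      · simp [hg, ih]
      · simp only [hg, if_false]
        by_cases hb : pvIsBoundary g
        · simp only [hb, if_true, ih]
          by_cases hc : cur = [] <;> simp [hc, pvAttach]
        · simp only [hb, if_false, ih, Bool.false_eq_true]
          congr 1
          cases hs : pvSpec t with
          | nil =>
              simp [pvAttach]
          | cons z zs =>
              by_cases hc : cur = [] <;> simp [pvAttach, hc]

theorem pvB_inv (l : List String) :
    l.foldr (fun g zr =>
      if g = "" then zr
      else if pvIsBoundary g || zr.isEmpty then zr ++ [[g]]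
      else zr.dropLast ++ [zr.getLastD [] ++ [g]]) [] = ((pvSpec l).map List.reverse).reverse := by
  induction l with
  | nil => simp [pvSpec]
  | cons g t ih =>
      simp only [List.foldr_cons, ih, pvSpec]
      by_cases hg : g = ""
      · simp [hg]
      · simp only [hg, if_false]
        by_cases hb : pvIsBoundary g
        · simp [hb]
        · simp only [hb, Bool.false_or]
          cases hs : pvSpec t with
          | nil => simp
          | cons z zs => simp

theorem pvA_eq_spec (l : List String) : determine_lockout_zones l = pvSpec l := by
  have := pvA_inv l [] []
  simpa [determine_lockout_zones, pvAttach] using this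

theorem pvB_eq_spec (l : List String) : determine_lockout_zones_alt l = pvSpec l := by
  unfold determine_lockout_zones_alt
  rw [List.foldl_reverse]
  rw [pvB_inv]
  simp [List.map_map, Function.comp_def]

-- ===== VERDICT (by name: the statement is the Claim_ definition above) =====
theorem determine_lockout_zones_spec : Claim_equal_determine_lockout_zones := by
  intro l _
  unfold Spec_determine_lockout_zones
  rw [pvA_eq_spec, pvB_eq_spec]
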